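-- pv_equiv track=rewrite | github.com/hcw3737/Algorithm | baekjoon/24523.py | solution
-- ===== SOURCE A (Python) =====
-- def solution(n, arr):
--     answer = []
--     for i in range(n) :
--         if i == n-1:
--             answer.append(-1)
--             break
--         res_arr = arr[i+1:]
--         small = min(res_arr)
--         if arr[i] == small:
--             # sort_arr = list(set(sorted(res_arr)))
--             sort_arr = list(set(res_arr))
--             sort_arr.remove(small)
--
--             if sort_arr == []:
--                 answer.append(-1)
--                 continue
--             else:
--                 small = min(sort_arr)
--
--         idx = res_arr.index(small)
--         answer.append(i+idx+2)
--
--     return list(map(str,answer))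
-- ===== SOURCE B (Python) =====
-- def solution(n, arr):
--     # One right-to-left sweep keeping (value, leftmost index) of the smallest
--     # and second-smallest distinct suffix values; O(len(arr)) instead of O(n^2).
--     if n <= 0:
--         return []
--     out = []
--     p1 = None  # (smallest value of arr[j:], its leftmost index there)
--     p2 = None  # (second-smallest distinct value of arr[j:], its leftmost index)
--     for j in range(len(arr) - 1, 0, -1):
--         v = arr[j]
--         if p1 is None or v < p1[0]:
--             p2 = p1
--             p1 = (v, j)
--         elif v == p1[0]:
--             p1 = (v, j)
--         elif p2 is None or v < p2[0]:
--             p2 = (v, j)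
--         elif v == p2[0]:
--             p2 = (v, j)
--         if j <= n - 1:
--             if arr[j - 1] == p1[0]:
--                 out.append(-1 if p2 is None else p2[1] + 1)
--             else:
--                 out.append(p1[1] + 1)
--     out.reverse()
--     out.append(-1)
--     return [str(x) for x in out]
-- ===== Notes on version B (the rewrite author's own statement) =====
-- stated objective: faster
-- what changed: Replaced the per-index O(n) suffix scans (min, set, remove, index) with a single right-to-left sweep that maintains the smallest and second-smallest distinct suffix values together with their leftmost indices.
import Mathlib
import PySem

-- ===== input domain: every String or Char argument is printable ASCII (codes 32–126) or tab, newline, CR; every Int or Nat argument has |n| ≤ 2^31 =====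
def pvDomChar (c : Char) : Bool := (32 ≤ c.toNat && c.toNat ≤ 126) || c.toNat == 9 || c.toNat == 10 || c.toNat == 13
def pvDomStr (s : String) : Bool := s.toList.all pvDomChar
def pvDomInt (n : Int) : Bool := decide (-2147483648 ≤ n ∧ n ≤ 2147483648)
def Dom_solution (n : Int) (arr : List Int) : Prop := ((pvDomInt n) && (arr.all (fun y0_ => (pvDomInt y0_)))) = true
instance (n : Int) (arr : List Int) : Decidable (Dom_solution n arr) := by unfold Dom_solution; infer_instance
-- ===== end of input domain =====

-- B replaces A's per-index suffix scans with one right-to-left sweep (objective: faster, O(n) vs O(n^2)).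

-- ===== PORT A =====
-- literal transliteration of A's loop; `answer` is the accumulator, break at i = n-1.
-- the `none` fallbacks mark places where the Python raises (min([]) ValueError); Pre_ excludes them.
def solA_loop (n : Int) (arr : List Int) (i : Int) (answer : List Int) : List Int :=
  if _h : i < n then
    if i = n - 1 then answer ++ [-1]
    else
      let res := PySem.List.slice arr (some (i+1)) none
      match PySem.List.min? res (fun x => x) with
      | none => answer   -- Python: ValueError (outside Pre_)
      | some small =>
        if PySem.List.pyGetD arr i 0 = small then
          match PySem.List.remove? (PySem.Set.ofList res) small with
          | none => answer   -- unreachable: small ∈ set(res)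
          | some sort_arr =>
            if sort_arr = [] then solA_loop n arr (i+1) (answer ++ [-1])
            else
              match PySem.List.min? sort_arr (fun x => x) with
              | none => answer   -- unreachable: sort_arr ≠ []
              | some small2 =>
                match PySem.List.index? res small2 with
                | none => answer   -- unreachable: small2 ∈ res
                | some idx => solA_loop n arr (i+1) (answer ++ [i + (idx : Int) + 2])
        else
          match PySem.List.index? res small with
          | none => answer   -- unreachable: small ∈ res
          | some idx => solA_loop n arr (i+1) (answer ++ [i + (idx : Int) + 2])
  else answer
termination_by (n - i).toNat
decreasing_by all_goals (simp_wf; omega)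

def solution (n : Int) (arr : List Int) : List String :=
  (solA_loop n arr 0 []).map PySem.Int.toStr

-- ===== PORT B =====
-- literal transliteration of Source B: state update for one element arr[j] = v,
-- p1/p2 = (value, leftmost index) of the smallest / second-smallest distinct suffix value.
def stepB (j v : Int) (p1 p2 : Option (Int × Int)) : Option (Int × Int) × Option (Int × Int) :=
  match p1 with
  | none => (some (v, j), p1)
  | some (m1, i1) =>
    if v < m1 then (some (v, j), some (m1, i1))
    else if v = m1 then (some (v, j), p2)
    else
      match p2 with
      | none => (some (m1, i1), some (v, j))
      | some (m2, _) =>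
        if v < m2 then (some (m1, i1), some (v, j))
        else if v = m2 then (some (m1, i1), some (v, j))
        else (some (m1, i1), p2)

def solB_loop (n : Int) (arr : List Int) (j : Int) (p1 p2 : Option (Int × Int)) (out : List Int) : List Int :=
  if _h : 1 ≤ j then
    let v := PySem.List.pyGetD arr j 0
    let st := stepB j v p1 p2
    let out' :=
      if j ≤ n - 1 then
        match st.1 with
        | none => out   -- unreachable: p1 set after first iteration
        | some (m1, i1) =>
          if PySem.List.pyGetD arr (j-1) 0 = m1 then
            match st.2 with
            | none => out ++ [-1]
            | some (_, i2) => out ++ [i2 + 1]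
          else out ++ [i1 + 1]
      else out
    solB_loop n arr (j-1) st.1 st.2 out'
  else out
termination_by j.toNat
decreasing_by simp_wf; omega

def solution_alt (n : Int) (arr : List Int) : List String :=
  if n ≤ 0 then []
  else
    (((solB_loop n arr ((arr.length : Int) - 1) none none []).reverse) ++ [-1]).map PySem.Int.toStr

-- ===== PRECONDITION & SPEC =====
-- Pre_ excludes exactly the inputs where A raises ValueError: min([]) on an empty suffix,
-- which happens iff n exceeds both len(arr) and 1.
def Pre_solution (n : Int) (arr : List Int) : Prop := n ≤ (arr.length : Int) ∨ n ≤ 1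
instance (n : Int) (arr : List Int) : Decidable (Pre_solution n arr) := by unfold Pre_solution; infer_instance
def pvWitness_solution : Int × List Int := (4, [3, 1, 4, 1, 5])

def Spec_solution (n : Int) (arr : List Int) (out : List String) : Prop := out = solution_alt n arr
instance (n : Int) (arr : List Int) (out : List String) : Decidable (Spec_solution n arr out) := by unfold Spec_solution; infer_instance

-- ===== CLAIM (what is proved, stated in full; the proofs are below) =====
def Claim_equal_solution : Prop := ∀ (n : Int) (arr : List Int), Dom_solution n arr → Pre_solution n arr → Spec_solution n arr (solution n arr)

-- ===== LEMMAS AND PROOFS =====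

-- the common per-index answer value: what A appends for index i (0 ≤ i ≤ n-2)
def fAns (arr : List Int) (i : Nat) : Int :=
  let s := arr.drop (i+1)
  match PySem.List.min? s (fun x => x) with
  | none => 0
  | some v1 =>
    if PySem.List.pyGetD arr (i : Int) 0 = v1 then
      match PySem.List.min? (s.filter (fun x => x ≠ v1)) (fun x => x) with
      | none => -1
      | some v2 => (i : Int) + (List.idxOf v2 s : Int) + 2
    else (i : Int) + (List.idxOf v1 s : Int) + 2

theorem min?_id_eq_some_iff (s : List Int) (m : Int) :
    PySem.List.min? s (fun x => x) = some m ↔ m ∈ s ∧ ∀ y ∈ s, m ≤ y := by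
  constructor
  · intro h
    exact ⟨PySem.List.min?_mem h, fun y hy => PySem.List.min?_isMin h y hy⟩
  · rintro ⟨hm, hmin⟩
    cases hs : PySem.List.min? s (fun x => x) with
    | none =>
      rw [PySem.List.min?_eq_none_iff _ _] at hs
      simp [hs] at hm
    | some m' =>
      have h1 := PySem.List.min?_mem hs
      have h2 := PySem.List.min?_isMin hs
      have := le_antisymm (hmin m' h1) (h2 m hm)
      simp [this]

theorem min?_congr_mem (s t : List Int) (h : ∀ x, x ∈ s ↔ x ∈ t) :
    PySem.List.min? s (fun x => x) = PySem.List.min? t (fun x => x) := by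
  cases hs : PySem.List.min? s (fun x => x) with
  | none =>
    rw [PySem.List.min?_eq_none_iff _ _] at hs
    subst hs
    cases ht : PySem.List.min? t (fun x => x) with
    | none => rfl
    | some m =>
      have := PySem.List.min?_mem ht
      rw [← h] at this; simp at this
  | some m =>
    rw [min?_id_eq_some_iff] at hs
    symm
    rw [min?_id_eq_some_iff]
    exact ⟨(h m).1 hs.1, fun y hy => hs.2 y ((h y).2 hy)⟩

theorem index?_of_mem (s : List Int) (v : Int) (h : v ∈ s) :
    PySem.List.index? s v = some (List.idxOf v s) := by
  induction s with
  | nil => simp at h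
  | cons x t ih =>
    by_cases hx : x = v
    · subst hx
      rw [PySem.List.index?_cons_self]
      simp [List.idxOf_cons_self]
    · have hv : v ∈ t := by
        rcases List.mem_cons.mp h with h1 | h1
        · exact absurd h1.symm hx
        · exact h1
      rw [PySem.List.index?_cons_of_ne (xs := t) (x := x) (v := v) hx, ih hv]
      simp [List.idxOf_cons_ne _ (fun e => hx e)]

-- min over set(res) minus its min = min over filter
theorem min?_erase_ofList (s : List Int) (v : Int) :
    PySem.List.min? ((PySem.Set.ofList s).erase v) (fun x => x)
      = PySem.List.min? (s.filter (fun x => x ≠ v)) (fun x => x) := by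
  apply min?_congr_mem
  intro x
  rw [List.Nodup.mem_erase_iff (PySem.Set.nodup_ofList s)]
  simp [PySem.Set.mem_ofList, List.mem_filter, and_comm]

-- ===== A side: the loop produces map fAns ++ [-1] =====
theorem solA_loop_eq (n : Int) (arr : List Int)
    (hn : 1 ≤ n) (hpre : n ≤ (arr.length : Int) ∨ n = 1) :
    ∀ (i : Nat) (answer : List Int), (i : Int) ≤ n - 1 →
      solA_loop n arr (i : Int) answer
        = answer ++ ((List.range ((n-1).toNat - i)).map (fun k => fAns arr (i + k))) ++ [-1] := by
  intro i answer hi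
  generalize hfuel : (n - 1).toNat - i = fuel
  induction fuel generalizing i answer with
  | zero =>
    have hieq : (i : Int) = n - 1 := by omega
    rw [solA_loop]
    simp [hieq]
  | succ f ih =>
    have hilt : (i : Int) < n - 1 := by omega
    have hlen : (i : Int) + 1 < (arr.length : Int) := by
      rcases hpre with h | h
      · omega
      · omega
    rw [solA_loop]
    simp only [show (i : Int) < n by omega, dite_true]
    rw [if_neg (by omega)]
    have hslice : PySem.List.slice arr (some ((i : Int) + 1)) none = arr.drop (i+1) := by
      have := PySem.List.slice_from_natCast arr (i+1)
      simpa using this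
    rw [hslice]
    have hne : arr.drop (i+1) ≠ [] := by
      intro hnil
      have := List.drop_eq_nil_iff.mp hnil
      omega
    set s := arr.drop (i+1) with hs
    cases hmin : PySem.List.min? s (fun x => x) with
    | none => exact absurd ((PySem.List.min?_eq_none_iff _ _).mp hmin) hne
    | some v1 =>
      dsimp only
      have hf : f = (n-1).toNat - (i+1) := by omega
      subst hf
      have hrec : ∀ ans, solA_loop n arr ((i:Int) + 1) ans
          = ans ++ ((List.range ((n-1).toNat - (i+1))).map (fun k => fAns arr ((i+1) + k))) ++ [-1] := by
        intro ans
        have := ih (i+1) ans (by push_cast; omega) rfl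
        push_cast at this
        exact this
      have hrange : (List.range (((n-1).toNat - (i+1)) + 1)).map (fun k => fAns arr (i + k))
          = fAns arr i :: (List.range ((n-1).toNat - (i+1))).map (fun k => fAns arr ((i+1) + k)) := by
        rw [List.range_succ_eq_map, List.map_cons, List.map_map]
        congr 1
        apply List.map_congr_left
        intro k _
        show fAns arr (i + (k+1)) = fAns arr ((i+1) + k)
        congr 1
        omega
      have hfAns : fAns arr i =
          (match PySem.List.min? s (fun x => x) with
           | none => 0
           | some v1 =>
             if PySem.List.pyGetD arr (i : Int) 0 = v1 then
               match PySem.List.min? (s.filter (fun x => x ≠ v1)) (fun x => x) with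
               | none => -1
               | some v2 => (i : Int) + (List.idxOf v2 s : Int) + 2
             else (i : Int) + (List.idxOf v1 s : Int) + 2) := by
        rfl
      by_cases hcur : PySem.List.pyGetD arr (i : Int) 0 = v1
      · -- arr[i] = min: set/remove path
        have hv1mem : v1 ∈ s := PySem.List.min?_mem hmin
        have hmemset : v1 ∈ PySem.Set.ofList s := by
          rw [PySem.Set.mem_ofList]; exact hv1mem
        rw [if_pos hcur, PySem.List.remove?_eq_some_erase _ v1 hmemset]
        dsimp only
        cases hmin2 : PySem.List.min? (s.filter (fun x => x ≠ v1)) (fun x => x) with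
        | none =>
          have hfilnil : s.filter (fun x => x ≠ v1) = [] := (PySem.List.min?_eq_none_iff _ _).mp hmin2
          have hsanil : (PySem.Set.ofList s).erase v1 = [] := by
            rw [List.eq_nil_iff_forall_not_mem]
            intro x hx
            rw [List.Nodup.mem_erase_iff (PySem.Set.nodup_ofList s), PySem.Set.mem_ofList] at hx
            have : x ∈ s.filter (fun y => y ≠ v1) := by
              rw [List.mem_filter]; exact ⟨hx.2, by simpa using hx.1⟩
            rw [hfilnil] at this; simp at this
          simp only [hsanil]
          rw [hrec, hrange, hfAns, hmin]
          have hmin2' := hmin2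
          simp only [ne_eq, decide_not] at hmin2'
          simp [hcur, hmin2']
        | some v2 =>
          have hsane : (PySem.Set.ofList s).erase v1 ≠ [] := by
            intro hnil
            have hv2mem := PySem.List.min?_mem hmin2
            have : v2 ∈ (PySem.Set.ofList s).erase v1 := by
              rw [List.Nodup.mem_erase_iff (PySem.Set.nodup_ofList s), PySem.Set.mem_ofList]
              rw [List.mem_filter] at hv2mem
              exact ⟨by simpa using hv2mem.2, hv2mem.1⟩
            rw [hnil] at this; simp at this
          rw [if_neg hsane]
          rw [min?_erase_ofList, hmin2]
          dsimp only
          have hv2s : v2 ∈ s := by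
            have := PySem.List.min?_mem hmin2
            exact (List.mem_filter.mp this).1
          rw [index?_of_mem s v2 hv2s]
          dsimp only
          rw [hrec, hrange, hfAns, hmin]
          have hmin2' := hmin2
          simp only [ne_eq, decide_not] at hmin2'
          simp [hcur, hmin2']
      · rw [if_neg hcur]
        have hv1mem : v1 ∈ s := PySem.List.min?_mem hmin
        rw [index?_of_mem s v1 hv1mem]
        dsimp only
        rw [hrec, hrange, hfAns, hmin]
        dsimp only
        rw [if_neg hcur]
        simp

-- ===== B side =====
-- pure state after having processed indices j .. arr.length-1 (right-to-left)
def stOf (arr : List Int) (j : Nat) : Option (Int × Int) × Option (Int × Int) :=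
  if h : j < arr.length then
    let st := stOf arr (j+1)
    stepB (j : Int) arr[j] st.1 st.2
  else (none, none)
termination_by arr.length - j

def q1 (t : List Int) (off : Int) : Option (Int × Int) :=
  match PySem.List.min? t (fun x => x) with
  | none => none
  | some v1 => some (v1, off + (List.idxOf v1 t : Int))

def q2 (t : List Int) (off : Int) : Option (Int × Int) :=
  match PySem.List.min? t (fun x => x) with
  | none => none
  | some v1 =>
    match PySem.List.min? (t.filter (fun x => x ≠ v1)) (fun x => x) with
    | none => none
    | some v2 => some (v2, off + (List.idxOf v2 t : Int))

theorem min?_singleton (v : Int) : PySem.List.min? [v] (fun x => x) = some v := by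
  rw [min?_id_eq_some_iff]
  simp

theorem min?_cons_of_min (v m : Int) (t : List Int)
    (h : PySem.List.min? t (fun x => x) = some m) :
    PySem.List.min? (v :: t) (fun x => x) = some (min v m) := by
  rw [min?_id_eq_some_iff] at h ⊢
  constructor
  · rcases le_total v m with h1 | h1
    · simp [min_eq_left h1]
    · simp [min_eq_right h1, h.1]
  · intro y hy
    rcases List.mem_cons.mp hy with h1 | h1
    · subst h1; exact min_le_left _ _
    · exact le_trans (min_le_right _ _) (h.2 y h1)

theorem stepB_q (v : Int) (t : List Int) (off : Int) :
    stepB off v (q1 t (off+1)) (q2 t (off+1)) = (q1 (v :: t) off, q2 (v :: t) off) := by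
  cases hmt : PySem.List.min? t (fun x => x) with
  | none =>
    have ht0 : t = [] := (PySem.List.min?_eq_none_iff _ _).mp hmt
    subst ht0
    simp [q1, q2, stepB, min?_singleton, (PySem.List.min?_eq_none_iff _ _).mpr rfl]
  | some m1 =>
    have hm1mem : m1 ∈ t := PySem.List.min?_mem hmt
    have hm1min : ∀ y ∈ t, m1 ≤ y := fun y hy => PySem.List.min?_isMin hmt y hy
    have hq1' : q1 t (off+1) = some (m1, (off+1) + (List.idxOf m1 t : Int)) := by
      simp [q1, hmt]
    rcases lt_trichotomy v m1 with hvm | hvm | hvm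
    · -- new strict minimum: p1 := (v, off), p2 := old p1
      have hmin_cons : PySem.List.min? (v :: t) (fun x => x) = some v := by
        rw [min?_cons_of_min v m1 t hmt, min_eq_left (le_of_lt hvm)]
      have hfc : (v :: t).filter (fun x => decide (x ≠ v)) = t := by
        simp only [List.filter_cons]
        rw [if_neg (by simp)]
        apply List.filter_eq_self.mpr
        intro x hx
        simp only [ne_eq, decide_eq_true_eq]
        intro hxv
        subst hxv
        exact absurd (hm1min x hx) (by omega)
      have hq1 : q1 (v :: t) off = some (v, off) := by
        simp only [q1, hmin_cons]
        simp [List.idxOf_cons_self]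
      have hq2 : q2 (v :: t) off = some (m1, (off+1) + (List.idxOf m1 t : Int)) := by
        simp only [q2, hmin_cons]
        rw [hfc, hmt]
        simp only []
        rw [List.idxOf_cons_ne t (show v ≠ m1 by omega)]
        exact congrArg some (Prod.ext_iff.mpr ⟨rfl, by push_cast; ring⟩)
      rw [hq1', hq1, hq2]
      simp [stepB, hvm]
    · -- v equals the minimum: p1 := (v, off), p2 unchanged
      subst hvm
      have hmin_cons : PySem.List.min? (v :: t) (fun x => x) = some v := by
        rw [min?_cons_of_min v v t hmt, min_self]
      have hq1 : q1 (v :: t) off = some (v, off) := by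
        simp only [q1, hmin_cons]
        simp [List.idxOf_cons_self]
      have hfc : (v :: t).filter (fun x => decide (x ≠ v)) = t.filter (fun x => decide (x ≠ v)) := by
        simp
      have hq2 : q2 (v :: t) off = q2 t (off+1) := by
        simp only [q2, hmin_cons, hmt]
        rw [hfc]
        cases hmf : PySem.List.min? (t.filter (fun x => decide (x ≠ v))) (fun x => x) with
        | none => simp
        | some m2 =>
          have hm2f := PySem.List.min?_mem hmf
          rw [List.mem_filter] at hm2f
          have hm2ne : m2 ≠ v := by simpa using hm2f.2
          simp only []
          rw [List.idxOf_cons_ne t (fun h => hm2ne h.symm)]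
          exact congrArg some (Prod.ext_iff.mpr ⟨rfl, by push_cast; ring⟩)
      rw [hq1', hq1, hq2]
      simp [stepB]
    · -- v above the minimum: p1 unchanged, p2 possibly updated
      have hvne : v ≠ m1 := by omega
      have hmin_cons : PySem.List.min? (v :: t) (fun x => x) = some m1 := by
        rw [min?_cons_of_min v m1 t hmt, min_eq_right (le_of_lt hvm)]
      have hq1 : q1 (v :: t) off = some (m1, (off+1) + (List.idxOf m1 t : Int)) := by
        simp only [q1, hmin_cons]
        rw [List.idxOf_cons_ne t hvne]
        exact congrArg some (Prod.ext_iff.mpr ⟨rfl, by push_cast; ring⟩)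
      have hfc : (v :: t).filter (fun x => decide (x ≠ m1)) = v :: t.filter (fun x => decide (x ≠ m1)) := by
        simp [hvne]
      cases hmf : PySem.List.min? (t.filter (fun x => decide (x ≠ m1))) (fun x => x) with
      | none =>
        -- no second distinct value yet: p2 := (v, off)
        have hq2' : q2 t (off+1) = none := by
          simp only [q2, hmt, hmf]
        have hfnil : t.filter (fun x => decide (x ≠ m1)) = [] := (PySem.List.min?_eq_none_iff _ _).mp hmf
        have hq2 : q2 (v :: t) off = some (v, off) := by
          simp only [q2, hmin_cons]
          rw [hfc, hfnil, min?_singleton]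
          simp [List.idxOf_cons_self]
        rw [hq1', hq1, hq2, hq2']
        simp [stepB, hvne, show ¬ v < m1 by omega]
      | some m2 =>
        have hq2' : q2 t (off+1) = some (m2, (off+1) + (List.idxOf m2 t : Int)) := by
          simp only [q2, hmt, hmf]
        have hm2f := PySem.List.min?_mem hmf
        rw [List.mem_filter] at hm2f
        have hm2ne : m2 ≠ m1 := by simpa using hm2f.2
        have hminf : PySem.List.min? (v :: t.filter (fun x => decide (x ≠ m1))) (fun x => x)
            = some (min v m2) := min?_cons_of_min v m2 _ hmf
        rcases lt_trichotomy v m2 with hvm2 | hvm2 | hvm2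
        · have hq2 : q2 (v :: t) off = some (v, off) := by
            simp only [q2, hmin_cons]
            rw [hfc, hminf, min_eq_left (le_of_lt hvm2)]
            simp [List.idxOf_cons_self]
          rw [hq1', hq1, hq2, hq2']
          simp [stepB, hvne, show ¬ v < m1 by omega, hvm2]
        · subst hvm2
          have hq2 : q2 (v :: t) off = some (v, off) := by
            simp only [q2, hmin_cons]
            rw [hfc, hminf, min_self]
            simp [List.idxOf_cons_self]
          rw [hq1', hq1, hq2, hq2']
          simp [stepB, hvne, show ¬ v < m1 by omega]
        · have hq2 : q2 (v :: t) off = some (m2, (off+1) + (List.idxOf m2 t : Int)) := by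
            simp only [q2, hmin_cons]
            rw [hfc, hminf, min_eq_right (le_of_lt hvm2)]
            simp only []
            rw [List.idxOf_cons_ne t (show v ≠ m2 by omega)]
            exact congrArg some (Prod.ext_iff.mpr ⟨rfl, by push_cast; ring⟩)
          rw [hq1', hq1, hq2, hq2']
          simp [stepB, hvne, show ¬ v < m1 by omega, show ¬ v < m2 by omega, show v ≠ m2 by omega]

theorem stOf_eq (arr : List Int) :
    ∀ (j : Nat), stOf arr j = (q1 (arr.drop j) (j : Int), q2 (arr.drop j) (j : Int)) := by
  intro j
  generalize hfuel : arr.length - j = fuel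
  induction fuel generalizing j with
  | zero =>
    have hj : arr.length ≤ j := by omega
    rw [stOf, dif_neg (by omega)]
    have hdrop : arr.drop j = [] := List.drop_eq_nil_iff.mpr (by omega)
    simp [q1, q2, hdrop, (PySem.List.min?_eq_none_iff _ _).mpr rfl]
  | succ f ih =>
    have hj : j < arr.length := by omega
    rw [stOf, dif_pos hj, ih (j+1) (by omega)]
    have hdrop : arr.drop j = arr[j] :: arr.drop (j+1) := List.drop_eq_getElem_cons hj
    have hcast : ((j+1 : Nat) : Int) = (j : Int) + 1 := by push_cast; ring
    rw [hcast, hdrop]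
    exact stepB_q arr[j] (arr.drop (j+1)) (j : Int)

-- B's loop, started at counter j with the state of suffix j+1, collects exactly the
-- answers for indices min(j, n-1)-1 … 0, in reverse order.
theorem solB_loop_eq (n : Int) (arr : List Int) (hn : 1 ≤ n) :
    ∀ (j : Nat) (out : List Int), j < arr.length →
      solB_loop n arr (j : Int) (stOf arr (j+1)).1 (stOf arr (j+1)).2 out
        = out ++ ((List.range (min j (n-1).toNat)).map (fun i => fAns arr i)).reverse := by
  intro j
  induction j with
  | zero =>
    intro out _
    rw [solB_loop]
    simp
  | succ j ihj =>
    intro out hjlen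
    have hjlt : j + 1 < arr.length := hjlen
    rw [solB_loop]
    simp only [dif_pos (show (1:Int) ≤ ((j+1 : Nat) : Int) by push_cast; omega)]
    have hget : PySem.List.pyGetD arr ((j+1 : Nat) : Int) 0 = arr[j+1]'(by omega) := by
      rw [PySem.List.pyGetD_eq_getElem arr (i := ((j+1 : Nat) : Int)) 0 (by push_cast; omega) (by push_cast; omega)]
      simp
    have hstep : stepB ((j+1 : Nat) : Int) (arr[j+1]'(by omega)) (stOf arr (j+1+1)).1 (stOf arr (j+1+1)).2
        = stOf arr (j+1) := by
      conv_rhs => rw [stOf]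
      rw [dif_pos (show j+1 < arr.length by omega)]
    rw [hget, hstep]
    rw [show ((j+1 : Nat) : Int) - 1 = ((j : Nat) : Int) by push_cast; ring]
    rw [ihj _ (by omega)]
    -- it remains to evaluate the recorded entry
    by_cases hc : ((j+1 : Nat) : Int) ≤ n - 1
    · have hmin1 : min (j+1) (n-1).toNat = j + 1 := by omega
      have hminj : min j (n-1).toNat = j := by omega
      have hne : arr.drop (j+1) ≠ [] := by
        intro hnil
        have := List.drop_eq_nil_iff.mp hnil
        omega
      rw [if_pos hc, stOf_eq arr (j+1)]
      simp only []
      cases hmin : PySem.List.min? (arr.drop (j+1)) (fun x => x) with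
      | none => exact absurd ((PySem.List.min?_eq_none_iff _ _).mp hmin) hne
      | some v1 =>
        have hq1 : q1 (arr.drop (j+1)) ((j+1 : Nat) : Int)
            = some (v1, ((j+1 : Nat) : Int) + (List.idxOf v1 (arr.drop (j+1)) : Int)) := by
          simp [q1, hmin]
        rw [hq1]
        simp only []
        have hfA : fAns arr j =
            (match PySem.List.min? (arr.drop (j+1)) (fun x => x) with
             | none => 0
             | some v1 =>
               if PySem.List.pyGetD arr ((j : Nat) : Int) 0 = v1 then
                 match PySem.List.min? ((arr.drop (j+1)).filter (fun x => x ≠ v1)) (fun x => x) with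
                 | none => -1
                 | some v2 => ((j : Nat) : Int) + (List.idxOf v2 (arr.drop (j+1)) : Int) + 2
               else ((j : Nat) : Int) + (List.idxOf v1 (arr.drop (j+1)) : Int) + 2) := rfl
        by_cases hcur : PySem.List.pyGetD arr ((j : Nat) : Int) 0 = v1
        · rw [if_pos hcur]
          cases hmin2 : PySem.List.min? ((arr.drop (j+1)).filter (fun x => x ≠ v1)) (fun x => x) with
          | none =>
            have hq2 : q2 (arr.drop (j+1)) ((j+1 : Nat) : Int) = none := by
              simp only [q2, hmin, hmin2]
            rw [hq2]
            rw [hmin1, hminj, List.range_succ]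
            have hfv : fAns arr j = -1 := by
              rw [hfA, hmin]
              simp only []
              rw [if_pos hcur, hmin2]
            simp [hfv]
          | some v2 =>
            have hq2 : q2 (arr.drop (j+1)) ((j+1 : Nat) : Int)
                = some (v2, ((j+1 : Nat) : Int) + (List.idxOf v2 (arr.drop (j+1)) : Int)) := by
              simp only [q2, hmin, hmin2]
            rw [hq2]
            rw [hmin1, hminj, List.range_succ]
            have hfv : fAns arr j = ((j : Nat) : Int) + (List.idxOf v2 (arr.drop (j+1)) : Int) + 2 := by
              rw [hfA, hmin]
              simp only []
              rw [if_pos hcur, hmin2]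
            simp [hfv]; omega
        · rw [if_neg hcur]
          rw [hmin1, hminj, List.range_succ]
          have hfv : fAns arr j = ((j : Nat) : Int) + (List.idxOf v1 (arr.drop (j+1)) : Int) + 2 := by
            rw [hfA, hmin]
            simp only []
            rw [if_neg hcur]
          simp [hfv]; omega
    · rw [if_neg hc]
      have : min (j+1) (n-1).toNat = min j (n-1).toNat := by omega
      rw [this]

-- ===== VERDICT (by name: the statement is the Claim_ definition above) =====
theorem solution_spec : Claim_equal_solution := by
  intro n arr _ hpre
  unfold Spec_solution solution solution_alt
  by_cases hn : n ≤ 0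
  · rw [if_pos hn, solA_loop, dif_neg (by omega)]
    simp
  · rw [if_neg hn]
    have hn1 : 1 ≤ n := by omega
    have hpre' : n ≤ (arr.length : Int) ∨ n ≤ 1 := hpre
    have hA := solA_loop_eq n arr hn1
      (by rcases hpre' with h | h
          · exact Or.inl h
          · exact Or.inr (by omega)) 0 [] (by omega)
    cases harr : arr.length with
    | zero =>
      have hne1 : n = 1 := by
        rcases hpre' with h | h
        · rw [harr] at h; omega
        · omega
      have hA0 : solA_loop n arr 0 [] = (List.range (n-1).toNat).map (fun k => fAns arr k) ++ [-1] := by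
        simpa using hA
      rw [solB_loop, dif_neg (by norm_num)]
      rw [hA0]
      simp [hne1]
    | succ m =>
      have hst : stOf arr (m+1) = (none, none) := by
        rw [stOf, dif_neg (by omega)]
      have hA0 : solA_loop n arr 0 [] = (List.range (n-1).toNat).map (fun k => fAns arr k) ++ [-1] := by
        simpa using hA
      have hcast : (((m+1 : Nat) : Int) - 1) = ((m : Nat) : Int) := by
        push_cast; ring
      rw [hcast]
      have hB := solB_loop_eq n arr hn1 m [] (by omega)
      have hB' : solB_loop n arr ((m : Nat) : Int) none none []
          = ((List.range (min m (n-1).toNat)).map (fun i => fAns arr i)).reverse := by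
        simpa [hst] using hB
      have hminK : min m (n-1).toNat = (n-1).toNat := by
        rcases hpre' with h | h
        · rw [harr] at h; omega
        · omega
      rw [hB', hminK, hA0]
      simp
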